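-- pv_equiv track=rewrite | github.com/lastis-citra/get-navitime-train-line-time | main.py | create_first_name_seq
-- ===== SOURCE A (Python) =====
-- class Global:
--     USE = False
--     END = "横浜"
--
-- def create_first_name_seq(name_time_table):
--     size_seq = []
--     for name_time_seq_t in name_time_table:
--         stop_station_seq = [nt[0] for nt in name_time_seq_t[2]]
--         if Global.USE:
--             size = len(name_time_seq_t[2]) if Global.END in stop_station_seq else 0
--         else:
--             size = len(name_time_seq_t[2])
--         size_seq.append(size)
--     max_size = max(size_seq)
--
--     max_size_name_seq = []
--     for name_time_seq_t in name_time_table: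
--         if len(name_time_seq_t[2]) == max_size:
--             max_size_name_seq.append([nt[0] for nt in name_time_seq_t[2]])
--     return max_size_name_seq[0] if max_size_name_seq else []
-- ===== SOURCE B (Python) =====
-- def create_first_name_seq(name_time_table):
--     best_len = -1
--     best_names = []
--     for _, _, seq in name_time_table:
--         if len(seq) > best_len:
--             best_len = len(seq)
--             best_names = [nt[0] for nt in seq]
--     return best_names
-- ===== Notes on version B (the rewrite author's own statement) =====
-- stated objective: simpler
-- what changed: replaces A's two passes (build a size list, take its max, rescan for the first row of that length) by a single running-max pass that keeps the first maximal row's station names as it goes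
import Mathlib
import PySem

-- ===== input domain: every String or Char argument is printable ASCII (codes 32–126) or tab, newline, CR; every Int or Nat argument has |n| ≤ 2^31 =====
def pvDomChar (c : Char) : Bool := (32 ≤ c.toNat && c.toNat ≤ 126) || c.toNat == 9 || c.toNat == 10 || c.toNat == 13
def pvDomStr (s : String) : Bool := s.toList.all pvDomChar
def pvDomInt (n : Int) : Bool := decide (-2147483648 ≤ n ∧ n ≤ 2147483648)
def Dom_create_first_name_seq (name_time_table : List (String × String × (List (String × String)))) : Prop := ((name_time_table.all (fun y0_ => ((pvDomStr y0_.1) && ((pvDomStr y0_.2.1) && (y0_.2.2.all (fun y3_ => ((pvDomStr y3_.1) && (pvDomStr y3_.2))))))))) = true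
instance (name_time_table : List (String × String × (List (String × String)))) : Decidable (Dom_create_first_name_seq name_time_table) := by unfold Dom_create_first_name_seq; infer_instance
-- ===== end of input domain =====

-- B replaces A's two passes (size list + max + rescan) by one running-max pass; objective: simpler.


-- ===== PORT A =====
def Global_USE : Bool := false
def Global_END : String := "横浜"

def create_first_name_seq (name_time_table : List (String × String × (List (String × String)))) : List String :=
  let size_seq : List Int := name_time_table.foldl (fun acc name_time_seq_t =>
    let stop_station_seq := name_time_seq_t.2.2.map (fun nt => nt.1)
    let size : Int :=
      if Global_USE then
        (if stop_station_seq.contains Global_END then (name_time_seq_t.2.2.length : Int) else 0)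
      else (name_time_seq_t.2.2.length : Int)
    acc ++ [size]) []
  match PySem.List.max? size_seq (fun y => y) with
  | none => []   -- Python raises ValueError here (empty table); excluded by Pre_
  | some max_size =>
    let max_size_name_seq : List (List String) := name_time_table.foldl
      (fun acc name_time_seq_t =>
        if (name_time_seq_t.2.2.length : Int) == max_size then
          acc ++ [name_time_seq_t.2.2.map (fun nt => nt.1)]
        else acc) []
    match max_size_name_seq with
    | [] => []
    | x :: _ => x

-- ===== PORT B =====
def create_first_name_seq_alt (name_time_table : List (String × String × (List (String × String)))) : List String :=
  (name_time_table.foldl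
    (fun (st : Int × List String) r =>
      if (r.2.2.length : Int) > st.1 then ((r.2.2.length : Int), r.2.2.map (fun nt => nt.1)) else st)
    (-1, [])).2

-- ===== PRECONDITION & SPEC =====
-- Pre_ excludes only the empty table, on which Python A raises ValueError (max() of an empty sequence).
def Pre_create_first_name_seq (name_time_table : List (String × String × (List (String × String)))) : Prop := name_time_table ≠ []
instance (name_time_table : List (String × String × (List (String × String)))) : Decidable (Pre_create_first_name_seq name_time_table) := by unfold Pre_create_first_name_seq; infer_instance
def pvWitness_create_first_name_seq : (List (String × String × (List (String × String)))) := [("a", "b", [("s", "08:00")])]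

def Spec_create_first_name_seq (name_time_table : List (String × String × (List (String × String)))) (out : List String) : Prop := out = create_first_name_seq_alt name_time_table
instance (name_time_table : List (String × String × (List (String × String)))) (out : List String) : Decidable (Spec_create_first_name_seq name_time_table out) := by unfold Spec_create_first_name_seq; infer_instance

-- ===== CLAIM (what is proved, stated in full; the proofs are below) =====
def Claim_equal_create_first_name_seq : Prop := ∀ (name_time_table : List (String × String × (List (String × String)))), Dom_create_first_name_seq name_time_table → Pre_create_first_name_seq name_time_table → Spec_create_first_name_seq name_time_table (create_first_name_seq name_time_table)

-- ===== LEMMAS AND PROOFS =====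

-- row length as Int, station names of a row, running max, first maximal row's names
def pvLen (r : String × String × (List (String × String))) : Int := r.2.2.length
def pvNames (r : String × String × (List (String × String))) : List String := r.2.2.map (fun nt => nt.1)
def pvMax (t : List (String × String × (List (String × String)))) (m0 : Int) : Int :=
  t.foldl (fun a r => max a (pvLen r)) m0
def pvF (t : List (String × String × (List (String × String)))) (m : Int) : List String :=
  ((t.filter (fun r => pvLen r == m)).map pvNames).headD []

lemma pvLen_nonneg (r : String × String × (List (String × String))) : 0 ≤ pvLen r := by
  simp [pvLen]

lemma le_pvMax (t : List (String × String × (List (String × String)))) (m0 : Int) : m0 ≤ pvMax t m0 :=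
  (PySem.List.le_foldl_max_int t pvLen m0).1

-- B's running-max loop, characterised against the running max and the first maximal row
lemma keyB (t : List (String × String × (List (String × String)))) (m0 : Int) (n0 : List String) :
    t.foldl (fun (st : Int × List String) r =>
        if (r.2.2.length : Int) > st.1 then ((r.2.2.length : Int), r.2.2.map (fun nt => nt.1)) else st)
      (m0, n0)
    = (pvMax t m0, if m0 < pvMax t m0 then pvF t (pvMax t m0) else n0) := by
  induction t generalizing m0 n0 with
  | nil => simp [pvMax]
  | cons r rs ih =>
    simp only [List.foldl_cons]
    by_cases h : m0 < pvLen r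
    · have hmax : max m0 (pvLen r) = pvLen r := max_eq_right h.le
      have hM : pvMax (r :: rs) m0 = pvMax rs (pvLen r) := by
        simp [pvMax, hmax]
      have hle : pvLen r ≤ pvMax rs (pvLen r) := le_pvMax rs (pvLen r)
      rw [if_pos (show (r.2.2.length : Int) > m0 from h)]
      have e : ((r.2.2.length : Int), r.2.2.map (fun nt => nt.1)) = (pvLen r, pvNames r) := rfl
      rw [e, ih (pvLen r) (pvNames r)]
      rw [hM, if_pos (lt_of_lt_of_le h hle)]
      by_cases h2 : pvLen r < pvMax rs (pvLen r)
      · rw [if_pos h2]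
        have hne : (pvLen r == pvMax rs (pvLen r)) = false := by
          simp [Int.ne_of_lt h2]
        simp [pvF, hne]
      · have heq : pvLen r = pvMax rs (pvLen r) := le_antisymm hle (not_lt.mp h2)
        rw [if_neg h2]
        have hb : (pvLen r == pvMax rs (pvLen r)) = true := beq_iff_eq.mpr heq
        simp [pvF, hb, pvNames]
    · have hmax : max m0 (pvLen r) = m0 := max_eq_left (not_lt.mp h)
      have hM : pvMax (r :: rs) m0 = pvMax rs m0 := by
        simp [pvMax, hmax]
      rw [if_neg (show ¬ ((r.2.2.length : Int) > m0) from h)]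
      rw [ih m0 n0, hM]
      by_cases h2 : m0 < pvMax rs m0
      · rw [if_pos h2, if_pos h2]
        have hlt : pvLen r < pvMax rs m0 := lt_of_le_of_lt (not_lt.mp h) h2
        have hne : (pvLen r == pvMax rs m0) = false := by
          simp [Int.ne_of_lt hlt]
        simp [pvF, hne]
      · rw [if_neg h2, if_neg h2]

-- A on a nonempty table computes the first row of maximal length
lemma keyA (r : String × String × (List (String × String)))
    (rs : List (String × String × (List (String × String)))) :
    create_first_name_seq (r :: rs) = pvF (r :: rs) (pvMax rs (pvLen r)) := by
  unfold create_first_name_seq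
  simp only [Global_USE]
  rw [PySem.List.foldl_append_singleton_eq_map]
  simp only [List.nil_append, List.map_cons]
  rw [PySem.List.max?_id_cons, List.foldl_map]
  simp only []
  rw [PySem.List.foldl_append_if]
  simp only [List.nil_append]
  have : ∀ (l : List (List String)), (match l with | [] => ([] : List String) | x :: _ => x) = l.headD [] := by
    intro l; cases l <;> rfl
  rw [this]
  rfl

-- ===== VERDICT (by name: the statement is the Claim_ definition above) =====
theorem create_first_name_seq_spec : Claim_equal_create_first_name_seq := by
  intro t _ hpre
  unfold Spec_create_first_name_seq
  cases t with
  | nil => exact absurd rfl hpre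
  | cons r rs =>
    rw [keyA]
    unfold create_first_name_seq_alt
    rw [keyB]
    have h0 : (0 : Int) ≤ pvLen r := pvLen_nonneg r
    have h1 : pvMax (r :: rs) (-1) = pvMax rs (pvLen r) := by
      simp [pvMax, max_eq_right (by omega : (-1 : Int) ≤ pvLen r)]
    have h2 : (-1 : Int) < pvMax rs (pvLen r) :=
      lt_of_lt_of_le (by omega) (le_pvMax rs (pvLen r))
    rw [h1]
    simp [h2]
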